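-- pv_equiv track=rewrite | github.com/evoila/meho | meho_app/modules/agents/config/models.py | detect_model_type
-- ===== SOURCE A (Python) =====
-- from typing import Any, Literal
--
-- ModelType = Literal["instruct", "reasoning"]
--
-- MODEL_TYPE_PATTERNS: dict[str, ModelType] = {
--     # Anthropic (all instruct, adaptive thinking handled separately)
--     "claude-opus-4": "instruct",
--     "claude-sonnet-4": "instruct",
--     "claude-3.5-sonnet": "instruct",
--     "claude-3-opus": "instruct",
--     "claude-3-sonnet": "instruct",
--     "claude-3-haiku": "instruct",
--     "claude-3.5": "instruct",
--     "claude-3": "instruct",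
--     # OpenAI (Phase 82: Multi-LLM Support)
--     "gpt-4o": "instruct",
--     "gpt-4o-mini": "instruct",
--     "gpt-4-turbo": "instruct",
--     "gpt-4": "instruct",
--     "gpt-3.5": "instruct",
--     "o1": "reasoning",
--     "o1-mini": "reasoning",
--     "o3": "reasoning",
--     "o3-mini": "reasoning",
--     "o4-mini": "reasoning",
--     # Ollama common models (Phase 82: Multi-LLM Support)
--     "qwen2.5": "instruct",
--     "qwen3": "instruct",
--     "llama3": "instruct",
--     "llama3.1": "instruct",
--     "deepseek-r1": "reasoning",
--     "deepseek-v3": "instruct",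
--     "gemma2": "instruct",
--     "mistral": "instruct",
--     "mixtral": "instruct",
--     # Embeddings handled via separate Voyage AI pipeline, not this config
-- }
--
-- def detect_model_type(model_name: str) -> ModelType:
--     """Detect model type from model name.
--
--     Args:
--         model_name: Full model name (e.g., "anthropic:claude-opus-4-6")
--
--     Returns:
--         ModelType: "instruct" or "reasoning"
--     """
--     # Extract model part after provider prefix
--     name = model_name.split(":")[-1].lower()
--
--     # Check patterns (longest match first)
--     for pattern, model_type in sorted(
--         MODEL_TYPE_PATTERNS.items(),
--         key=lambda x: -len(x[0]),
--     ):
--         if pattern in name: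
--             return model_type
--
--     # Default to instruct
--     return "instruct"
-- ===== SOURCE B (Python) =====
-- from typing import Any, Literal
--
-- ModelType = Literal["instruct", "reasoning"]
--
-- MODEL_TYPE_PATTERNS: dict[str, ModelType] = {
--     "claude-opus-4": "instruct",
--     "claude-sonnet-4": "instruct",
--     "claude-3.5-sonnet": "instruct",
--     "claude-3-opus": "instruct",
--     "claude-3-sonnet": "instruct",
--     "claude-3-haiku": "instruct",
--     "claude-3.5": "instruct",
--     "claude-3": "instruct",
--     "gpt-4o": "instruct",
--     "gpt-4o-mini": "instruct",
--     "gpt-4-turbo": "instruct",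
--     "gpt-4": "instruct",
--     "gpt-3.5": "instruct",
--     "o1": "reasoning",
--     "o1-mini": "reasoning",
--     "o3": "reasoning",
--     "o3-mini": "reasoning",
--     "o4-mini": "reasoning",
--     "qwen2.5": "instruct",
--     "qwen3": "instruct",
--     "llama3": "instruct",
--     "llama3.1": "instruct",
--     "deepseek-r1": "reasoning",
--     "deepseek-v3": "instruct",
--     "gemma2": "instruct",
--     "mistral": "instruct",
--     "mixtral": "instruct",
-- }
--
-- def detect_model_type(model_name: str) -> ModelType:
--     """Detect model type from model name (one pass, no sorting)."""
--     name = model_name.split(":")[-1].lower()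
--     best = None  # best matching (pattern, type) so far
--     for pattern, model_type in MODEL_TYPE_PATTERNS.items():
--         if pattern in name and (best is None or len(pattern) > len(best[0])):
--             best = (pattern, model_type)
--     return best[1] if best is not None else "instruct"
-- ===== Notes on version B (the rewrite author's own statement) =====
-- stated objective: simpler
-- what changed: B replaces A's sort-by-descending-length followed by first-substring-match with a single pass over the pattern dict in insertion order keeping the longest matching pattern seen so far (strict > reproduces the stable-sort tie-break).
import Mathlib
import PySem

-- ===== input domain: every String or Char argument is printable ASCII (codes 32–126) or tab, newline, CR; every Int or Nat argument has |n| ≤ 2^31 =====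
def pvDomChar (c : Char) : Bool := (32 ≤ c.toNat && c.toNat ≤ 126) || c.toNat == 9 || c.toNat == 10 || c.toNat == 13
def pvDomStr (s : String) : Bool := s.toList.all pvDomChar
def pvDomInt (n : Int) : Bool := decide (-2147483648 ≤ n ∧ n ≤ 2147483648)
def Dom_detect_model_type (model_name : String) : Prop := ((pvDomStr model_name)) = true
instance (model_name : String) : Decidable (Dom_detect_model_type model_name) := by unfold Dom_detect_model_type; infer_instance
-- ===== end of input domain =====

-- B does one pass keeping the longest matching pattern instead of A's sort-then-first-match; same return value, no side effects.

-- shared module-level constant (the dict MODEL_TYPE_PATTERNS, as an insertion-order assoc list)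
def MODEL_TYPE_PATTERNS : List (String × String) :=
  [("claude-opus-4", "instruct"), ("claude-sonnet-4", "instruct"),
   ("claude-3.5-sonnet", "instruct"), ("claude-3-opus", "instruct"),
   ("claude-3-sonnet", "instruct"), ("claude-3-haiku", "instruct"),
   ("claude-3.5", "instruct"), ("claude-3", "instruct"),
   ("gpt-4o", "instruct"), ("gpt-4o-mini", "instruct"),
   ("gpt-4-turbo", "instruct"), ("gpt-4", "instruct"), ("gpt-3.5", "instruct"),
   ("o1", "reasoning"), ("o1-mini", "reasoning"), ("o3", "reasoning"),
   ("o3-mini", "reasoning"), ("o4-mini", "reasoning"),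
   ("qwen2.5", "instruct"), ("qwen3", "instruct"), ("llama3", "instruct"),
   ("llama3.1", "instruct"), ("deepseek-r1", "reasoning"),
   ("deepseek-v3", "instruct"), ("gemma2", "instruct"),
   ("mistral", "instruct"), ("mixtral", "instruct")]

-- ===== PORT A =====
-- the for-loop with early return over the sorted pattern list
def pvFirstMatch (nm : String) : List (String × String) → String
  | [] => "instruct"
  | (pat, ty) :: rest => if PySem.Str.isIn pat nm then ty else pvFirstMatch nm rest

def detect_model_type (model_name : String) : String :=
  -- split(":") with a nonempty separator always yields a nonempty list, so [-1] never raises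
  let nm := PySem.Str.lower (PySem.List.pyGetD ((PySem.Str.split? model_name ":").getD []) (-1) "")
  pvFirstMatch nm (PySem.List.sorted MODEL_TYPE_PATTERNS (fun x => -(PySem.Str.len x.1 : Int)) false)

-- ===== PORT B =====
-- B's fold step: adopt a pattern when it occurs in nm and is strictly longer than the best so far
def pvStep (nm : String) (best : Option (String × String)) (x : String × String) : Option (String × String) :=
  if PySem.Str.isIn x.1 nm &&
      (match best with
       | none => true
       | some b => decide (PySem.Str.len b.1 < PySem.Str.len x.1)) then some x else best

def detect_model_type_alt (model_name : String) : String :=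
  let nm := PySem.Str.lower (PySem.List.pyGetD ((PySem.Str.split? model_name ":").getD []) (-1) "")
  match MODEL_TYPE_PATTERNS.foldl (pvStep nm) none with
  | some (_, ty) => ty
  | none => "instruct"

-- ===== PRECONDITION & SPEC =====
def Spec_detect_model_type (model_name : String) (out : String) : Prop := out = detect_model_type_alt model_name
instance (model_name : String) (out : String) : Decidable (Spec_detect_model_type model_name out) := by unfold Spec_detect_model_type; infer_instance

-- ===== CLAIM (what is proved, stated in full; the proofs are below) =====
def Claim_equal_detect_model_type : Prop := ∀ (model_name : String), Dom_detect_model_type model_name → Spec_detect_model_type model_name (detect_model_type model_name)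

-- ===== LEMMAS AND PROOFS =====

-- stable insertion (descending by pattern length): x goes after every element of ≥ length
def pvIns (x : String × String) : List (String × String) → List (String × String)
  | [] => [x]
  | y :: ys => if PySem.Str.len x.1 ≤ PySem.Str.len y.1 then y :: pvIns x ys else x :: y :: ys

def pvIsort (l : List (String × String)) : List (String × String) :=
  l.foldl (fun acc x => pvIns x acc) []

def pvSortedD (s : List (String × String)) : Prop :=
  s.Pairwise (fun a b => PySem.Str.len b.1 ≤ PySem.Str.len a.1)

-- first match as an Option, remembering the pattern
def pvFirstMatchO (nm : String) : List (String × String) → Option (String × String)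
  | [] => none
  | x :: rest => if PySem.Str.isIn x.1 nm then some x else pvFirstMatchO nm rest

theorem pvFirstMatch_eq_O (nm : String) (s : List (String × String)) :
    pvFirstMatch nm s = (match pvFirstMatchO nm s with
                         | some (_, ty) => ty
                         | none => "instruct") := by
  induction s with
  | nil => rfl
  | cons x rest ih =>
    obtain ⟨pat, ty⟩ := x
    simp only [pvFirstMatch, pvFirstMatchO]
    split_ifs <;> simp [ih]

theorem pvFirstMatchO_mem {nm : String} {s : List (String × String)} {b : String × String}
    (h : pvFirstMatchO nm s = some b) : b ∈ s := by
  induction s with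
  | nil => simp [pvFirstMatchO] at h
  | cons x rest ih =>
    simp only [pvFirstMatchO] at h
    split_ifs at h with hq
    · simp_all
    · exact List.mem_cons_of_mem _ (ih h)

theorem pvMem_ins {b x : String × String} {ys : List (String × String)} :
    b ∈ pvIns x ys ↔ b = x ∨ b ∈ ys := by
  induction ys with
  | nil => simp [pvIns]
  | cons y ys ih =>
    simp only [pvIns]
    split_ifs with h
    · simp [ih]
      tauto
    · simp

theorem pvIns_sorted (x : String × String) (acc : List (String × String))
    (h : pvSortedD acc) : pvSortedD (pvIns x acc) := by
  induction acc with
  | nil => simp [pvIns, pvSortedD]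
  | cons y ys ih =>
    rw [pvSortedD, List.pairwise_cons] at h
    simp only [pvIns]
    split_ifs with hle
    · refine List.Pairwise.cons ?_ (ih h.2)
      intro b hb
      rcases pvMem_ins.mp hb with rfl | hb'
      · exact hle
      · exact h.1 b hb'
    · refine List.Pairwise.cons ?_ (List.Pairwise.cons h.1 h.2)
      intro b hb
      rcases List.mem_cons.mp hb with rfl | hb'
      · omega
      · have := h.1 b hb'; omega

theorem pvFirstMatchO_ins (nm : String) (x : String × String) (acc : List (String × String))
    (h : pvSortedD acc) :
    pvFirstMatchO nm (pvIns x acc) = pvStep nm (pvFirstMatchO nm acc) x := by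
  induction acc with
  | nil =>
    by_cases hx : PySem.Str.isIn x.1 nm
    · simp only [pvIns, pvFirstMatchO, pvStep, hx]; rfl
    · simp only [pvIns, pvFirstMatchO, pvStep]
      rw [if_neg (fun hc => hx hc), if_neg ?_]
      simp only [Bool.and_eq_true, not_and]
      intro hc _
      exact hx hc
  | cons y ys ih =>
    rw [pvSortedD, List.pairwise_cons] at h
    simp only [pvIns]
    split_ifs with hle
    · -- x inserted somewhere after y
      by_cases hy : PySem.Str.isIn y.1 nm
      · simp only [pvFirstMatchO, if_pos hy, pvStep]
        rw [if_neg]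
        simp only [Bool.and_eq_true, decide_eq_true_eq, not_and]
        intro _ hlt
        omega
      · simp only [pvFirstMatchO, if_neg hy]
        exact ih h.2
    · -- x at the front, strictly longer than y (hence than every match of y :: ys)
      by_cases hx : PySem.Str.isIn x.1 nm
      · have hcond : ∀ b, pvFirstMatchO nm (y :: ys) = some b →
            PySem.Str.len b.1 < PySem.Str.len x.1 := by
          intro b hb
          have hmem := pvFirstMatchO_mem hb
          rcases List.mem_cons.mp hmem with rfl | hb'
          · omega
          · have := h.1 b hb'; omega
        show (if PySem.Str.isIn x.1 nm then some x else pvFirstMatchO nm (y :: ys)) = _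
        rw [if_pos hx]
        simp only [pvStep]
        cases hfm : pvFirstMatchO nm (y :: ys) with
        | none => rw [if_pos (by rw [hx]; rfl)]
        | some b =>
          rw [if_pos]
          rw [hx, Bool.true_and, decide_eq_true_eq]
          exact hcond b hfm
      · show (if PySem.Str.isIn x.1 nm then some x else pvFirstMatchO nm (y :: ys)) = _
        rw [if_neg hx]
        simp only [pvStep]
        rw [if_neg]
        simp only [Bool.and_eq_true, not_and]
        intro hc _
        exact hx hc

theorem pvFold_ins (nm : String) (l acc : List (String × String)) (h : pvSortedD acc) :
    pvFirstMatchO nm (l.foldl (fun a x => pvIns x a) acc) =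
      l.foldl (pvStep nm) (pvFirstMatchO nm acc) := by
  induction l generalizing acc with
  | nil => rfl
  | cons x rest ih =>
    simp only [List.foldl_cons]
    rw [ih (pvIns x acc) (pvIns_sorted x acc h), pvFirstMatchO_ins nm x acc h]

theorem pvMain (nm : String) :
    pvFirstMatchO nm (pvIsort MODEL_TYPE_PATTERNS) =
      MODEL_TYPE_PATTERNS.foldl (pvStep nm) none := by
  have := pvFold_ins nm MODEL_TYPE_PATTERNS [] (by simp [pvSortedD])
  simpa [pvIsort, pvFirstMatchO] using this

-- the library's stable sort of the concrete pattern list coincides with our insertion sort of it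
theorem pvSort_eq :
    PySem.List.sorted MODEL_TYPE_PATTERNS (fun x => -(PySem.Str.len x.1 : Int)) false =
      pvIsort MODEL_TYPE_PATTERNS := by decide

-- ===== VERDICT (by name: the statement is the Claim_ definition above) =====
theorem detect_model_type_spec : Claim_equal_detect_model_type := by
  intro model_name _
  unfold Spec_detect_model_type detect_model_type detect_model_type_alt
  rw [pvSort_eq, pvFirstMatch_eq_O, pvMain]
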